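-- pv_equiv track=rewrite | github.com/sociedade-do-pastel/simple3 | lexer/afds.py | afd_emp
-- ===== SOURCE A (Python) =====
-- def afd_emp(lex):
--     """
--     Função que verifica um emp através de seu autômato
--
--     Argumentos:
--         lex - Lexema a ser testado
--
--     Retorno:
--         - Sucesso: ('emp', 'emp')
--         - Falha: None
--     """
--     afd = {
--         0: {'e': 1},
--         1: {'m': 2},
--         2: {'p': 3},
--         3: {}
--     }
--     final_states = [3]
--     current_state = 0
--
--     for word in str(lex):
--         current_state = afd[current_state].get(word)
--         if current_state is None:
--             return None
--
--     if current_state in final_states: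
--         return ('emp', lex)
-- ===== SOURCE B (Python) =====
-- def afd_emp(lex):
--     """Direct closed-form check: no automaton, just compare str(lex) to 'emp'."""
--     return ('emp', lex) if str(lex) == 'emp' else None
-- ===== Notes on version B (the rewrite author's own statement) =====
-- stated objective: simpler
-- what changed: Replaced the per-character DFA walk with nested dicts by a single string equality check str(lex) == 'emp'.
import Mathlib
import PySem

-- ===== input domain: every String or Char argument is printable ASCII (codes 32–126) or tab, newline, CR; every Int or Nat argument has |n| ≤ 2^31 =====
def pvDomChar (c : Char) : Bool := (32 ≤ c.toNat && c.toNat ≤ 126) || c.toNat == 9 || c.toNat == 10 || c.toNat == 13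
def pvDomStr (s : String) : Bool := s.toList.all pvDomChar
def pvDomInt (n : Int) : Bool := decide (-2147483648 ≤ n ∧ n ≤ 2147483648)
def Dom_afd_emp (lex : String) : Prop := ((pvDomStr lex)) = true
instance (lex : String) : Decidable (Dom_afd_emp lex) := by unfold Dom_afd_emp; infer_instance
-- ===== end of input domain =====

-- ===== PORT A =====
-- B replaces the per-character DFA walk by a single equality check (objective: simpler).
def afdTable : PySem.Dict Int (PySem.Dict Char Int) :=
  PySem.Dict.ofList [(0, PySem.Dict.ofList [('e', 1)]),
                     (1, PySem.Dict.ofList [('m', 2)]),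
                     (2, PySem.Dict.ofList [('p', 3)]),
                     (3, PySem.Dict.ofList [])]

-- the for-loop of A: walk the DFA; `none` = the early `return None`
def afdLoop (cs : List Char) (st : Int) : Option Int :=
  match cs with
  | [] => some st
  | c :: rest =>
    -- afd[current_state] always succeeds in A (states stay in the table); get? + getD [] is exact here
    match (PySem.Dict.getD afdTable st (PySem.Dict.ofList [])).get? c with
    | none => none
    | some st' => afdLoop rest st'

def afd_emp (lex : String) : Option (String × String) :=
  match afdLoop lex.toList 0 with
  | none => none
  | some st => if st ∈ ([3] : List Int) then some ("emp", lex) else none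

-- ===== PORT B =====
def afd_emp_alt (lex : String) : Option (String × String) :=
  if lex == "emp" then some ("emp", lex) else none

-- ===== PRECONDITION & SPEC =====
def Spec_afd_emp (lex : String) (out : Option (String × String)) : Prop := out = afd_emp_alt lex
instance (lex : String) (out : Option (String × String)) : Decidable (Spec_afd_emp lex out) := by unfold Spec_afd_emp; infer_instance

-- ===== CLAIM (what is proved, stated in full; the proofs are below) =====
def Claim_equal_afd_emp : Prop := ∀ (lex : String), Dom_afd_emp lex → Spec_afd_emp lex (afd_emp lex)

-- ===== LEMMAS AND PROOFS =====

theorem afdLoop_three (cs : List Char) : afdLoop cs 3 = some 3 ↔ cs = [] := by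
  cases cs with
  | nil => simp [afdLoop]
  | cons c rest =>
    have ht : afdTable.getD 3 (PySem.Dict.ofList []) = PySem.Dict.mk [] := rfl
    simp [afdLoop, ht, PySem.Dict.get?]

theorem afdLoop_two (cs : List Char) : afdLoop cs 2 = some 3 ↔ cs = ['p'] := by
  have ht : afdTable.getD 2 (PySem.Dict.ofList []) = PySem.Dict.mk [('p', 3)] := rfl
  cases cs with
  | nil => simp [afdLoop]
  | cons c rest =>
    by_cases hc : c = 'p'
    · subst hc
      simp [afdLoop, ht, PySem.Dict.get?, afdLoop_three]
    · simp [afdLoop, ht, PySem.Dict.get?, show ¬'p' = c from fun h => hc h.symm, hc]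

theorem afdLoop_one (cs : List Char) : afdLoop cs 1 = some 3 ↔ cs = ['m', 'p'] := by
  have ht : afdTable.getD 1 (PySem.Dict.ofList []) = PySem.Dict.mk [('m', 2)] := rfl
  cases cs with
  | nil => simp [afdLoop]
  | cons c rest =>
    by_cases hc : c = 'm'
    · subst hc
      simp [afdLoop, ht, PySem.Dict.get?, afdLoop_two]
    · simp [afdLoop, ht, PySem.Dict.get?, show ¬'m' = c from fun h => hc h.symm, hc]

theorem afdLoop_zero (cs : List Char) : afdLoop cs 0 = some 3 ↔ cs = ['e', 'm', 'p'] := by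
  have ht : afdTable.getD 0 (PySem.Dict.ofList []) = PySem.Dict.mk [('e', 1)] := rfl
  cases cs with
  | nil => simp [afdLoop]
  | cons c rest =>
    by_cases hc : c = 'e'
    · subst hc
      simp [afdLoop, ht, PySem.Dict.get?, afdLoop_one]
    · simp [afdLoop, ht, PySem.Dict.get?, show ¬'e' = c from fun h => hc h.symm, hc]

-- ===== VERDICT (by name: the statement is the Claim_ definition above) =====
theorem afd_emp_spec : Claim_equal_afd_emp := by
  intro lex _
  by_cases hb : lex = "emp"
  · subst hb
    decide
  · have hne : lex.toList ≠ ['e', 'm', 'p'] := by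
      intro h
      exact hb (String.toList_inj.mp (by rw [h]; decide))
    rcases hres : afdLoop lex.toList 0 with _ | st
    · simp [Spec_afd_emp, afd_emp, afd_emp_alt, hres, hb]
    · have h3 : st ≠ 3 := by
        intro he
        exact hne ((afdLoop_zero _).mp (by rw [hres, he]))
      simp [Spec_afd_emp, afd_emp, afd_emp_alt, hres, hb, h3]
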